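-- pv_equiv track=rewrite | github.com/tigerJkLee/opticharge | teamOrienteeringProblem_jackie.py | remove_zeroset
-- ===== SOURCE A (Python) =====
-- def remove_zeroset(result_list): ## nb of nodes가 0 이면 그 루트 아예 제거
--     tided_list = []
--     for i in range(0,len(result_list)):
--         if len(result_list[i]) == 2:
--             tided_list.append(i)
--
--     for j in range(0, len(tided_list)):
--         tided_list.sort(reverse=True)
--         del result_list[tided_list[j]]
--
--     return result_list
-- ===== SOURCE B (Python) =====
-- def remove_zeroset(result_list): ## nb of nodes가 0 이면 그 루트 아예 제거
--     # single in-place filter (slice assignment keeps the same list object mutated)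
--     result_list[:] = [row for row in result_list if len(row) != 2]
--     return result_list
-- ===== Notes on version B (the rewrite author's own statement) =====
-- stated objective: simpler
-- what changed: Replaces the index-collection pass plus the per-iteration reverse sort and descending index deletions with a single in-place filter via slice assignment.
import Mathlib
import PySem

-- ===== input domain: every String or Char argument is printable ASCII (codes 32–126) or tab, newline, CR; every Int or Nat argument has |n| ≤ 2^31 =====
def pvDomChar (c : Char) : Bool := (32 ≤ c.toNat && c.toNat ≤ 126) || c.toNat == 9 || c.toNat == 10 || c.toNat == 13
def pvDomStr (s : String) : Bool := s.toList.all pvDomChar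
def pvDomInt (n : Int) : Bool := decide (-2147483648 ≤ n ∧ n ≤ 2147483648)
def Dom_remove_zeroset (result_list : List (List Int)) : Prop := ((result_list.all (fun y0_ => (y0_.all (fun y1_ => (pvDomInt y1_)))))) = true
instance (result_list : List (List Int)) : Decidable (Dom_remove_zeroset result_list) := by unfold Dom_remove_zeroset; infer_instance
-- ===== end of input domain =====

-- B replaces A's index-list + per-iteration reverse sort + descending deletions by one in-place
-- filter (slice assignment), a simpler decomposition; equivalence is about
-- the RETURN value (both Pythons mutate result_list in place to that same value).

-- ===== PORT A =====
-- 'del result_list[t[j]]' is ported as eraseIdx; exact here: every index A deletes at is a valid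
-- nonnegative index (descending valid indices), so Python's del never raises on any input.
def remove_zeroset (result_list : List (List Int)) : List (List Int) :=
  let tided_list : List Int :=
    (PySem.List.pyRange 0 (result_list.length : Int) 1).foldl
      (fun acc i => if (PySem.List.pyGetD result_list i []).length = 2 then acc ++ [i] else acc) []
  let st : List Int × List (List Int) :=
    (PySem.List.pyRange 0 (tided_list.length : Int) 1).foldl
      (fun st j =>
        let t := PySem.List.sorted st.1 (fun x => x) true
        (t, st.2.eraseIdx (PySem.List.pyGetD t j 0).toNat))
      (tided_list, result_list)
  st.2

-- ===== PORT B =====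
def remove_zeroset_alt (result_list : List (List Int)) : List (List Int) :=
  result_list.filter (fun row => row.length != 2)

-- ===== PRECONDITION & SPEC =====
def Spec_remove_zeroset (result_list : List (List Int)) (out : List (List Int)) : Prop := out = remove_zeroset_alt result_list
instance (result_list : List (List Int)) (out : List (List Int)) : Decidable (Spec_remove_zeroset result_list out) := by unfold Spec_remove_zeroset; infer_instance

-- ===== CLAIM (what is proved, stated in full; the proofs are below) =====
def Claim_equal_remove_zeroset : Prop := ∀ (result_list : List (List Int)), Dom_remove_zeroset result_list → Spec_remove_zeroset result_list (remove_zeroset result_list)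

-- ===== LEMMAS AND PROOFS =====

-- ascending indices (as Nats) of the length-2 rows
def ascIdx (xs : List (List Int)) : List Nat :=
  (List.range xs.length).filter (fun i => decide ((xs.getD i []).length = 2))

theorem ascIdx_cons (x : List Int) (xs : List (List Int)) :
    ascIdx (x :: xs) = (if x.length = 2 then [0] else []) ++ (ascIdx xs).map Nat.succ := by
  simp only [ascIdx, List.length_cons, List.range_succ_eq_map, List.filter_cons, List.filter_map]
  by_cases h : x.length = 2 <;> simp [h, Function.comp_def, List.getD] <;> rfl

theorem ascIdx_pairwise (xs : List (List Int)) : (ascIdx xs).Pairwise (· < ·) :=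
  List.Pairwise.filter _ (List.pairwise_lt_range)

-- delete at successor indices: the head survives
theorem foldl_eraseIdx_map_succ (ds : List Nat) :
    ∀ (x : List Int) (xs : List (List Int)),
      (ds.map Nat.succ).foldl (fun l i => l.eraseIdx i) (x :: xs)
        = x :: ds.foldl (fun l i => l.eraseIdx i) xs := by
  induction ds with
  | nil => intro x xs; rfl
  | cons d ds ih =>
      intro x xs
      simp only [List.map_cons, List.foldl_cons, List.eraseIdx_cons_succ]
      exact ih x (xs.eraseIdx d)

-- deleting all length-2 rows at descending indices IS the filter
theorem foldl_eraseIdx_desc (xs : List (List Int)) :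
    (ascIdx xs).reverse.foldl (fun l i => l.eraseIdx i) xs
      = xs.filter (fun row => row.length != 2) := by
  induction xs with
  | nil => rfl
  | cons x xs ih =>
      rw [ascIdx_cons, List.reverse_append, List.map_reverse.symm, List.foldl_append,
        foldl_eraseIdx_map_succ, ih]
      by_cases h : x.length = 2 <;> simp [h]

theorem int_ofNat_strictMono : StrictMono (fun n : Nat => (n : Int)) :=
  fun _ _ h => Int.ofNat_lt.mpr h

-- the port's first loop computes the ascending index list (as Ints)
theorem tided_eq (xs : List (List Int)) :
    (PySem.List.pyRange 0 (xs.length : Int) 1).foldl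
        (fun acc i => if (PySem.List.pyGetD xs i []).length = 2 then acc ++ [i] else acc) []
      = (ascIdx xs).map (fun n : Nat => (n : Int)) := by
  rw [PySem.List.pyRange_zero_nat, PySem.List.foldl_append_ite_eq_filter, List.filter_map]
  simp [ascIdx, Function.comp_def, List.getD]
  rfl

-- the second loop, once the re-sorted index list D is fixed: the pair's first component stays D
theorem loop_snd (D : List Int)
    (hD : PySem.List.sorted D (fun x => x) true = D) :
    ∀ (n : Nat) (a : Int) (L : List Int) (ys : List (List Int)),
      PySem.List.sorted L (fun x => x) true = D →
      ((PySem.List.pyRange a (a + n) 1).foldl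
          (fun st (j : Int) =>
            let t := PySem.List.sorted st.1 (fun x => x) true
            (t, st.2.eraseIdx (PySem.List.pyGetD t j 0).toNat))
          (L, ys)).2
        = (PySem.List.pyRange a (a + n) 1).foldl
            (fun acc j => acc.eraseIdx (PySem.List.pyGetD D j 0).toNat) ys := by
  intro n
  induction n with
  | zero =>
      intro a L ys _
      rw [PySem.List.pyRange_one_eq_nil (by push_cast; omega)]
      rfl
  | succ n ih =>
      intro a L ys hL
      rw [PySem.List.pyRange_one_cons (by push_cast; omega)]
      simp only [List.foldl_cons, hL]
      have h1 : a + (((n + 1 : Nat) : Int)) = (a + 1) + (n : Int) := by push_cast; ring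
      rw [h1]
      exact ih (a + 1) D (ys.eraseIdx (PySem.List.pyGetD D a 0).toNat) hD

-- the descending index list really is what sorting (reverse=True) produces, and is a fixed point
theorem sorted_rev_asc (xs : List (List Int)) :
    PySem.List.sorted ((ascIdx xs).map (fun n : Nat => (n : Int))) (fun x => x) true
      = ((ascIdx xs).reverse.map (fun n : Nat => (n : Int))) := by
  apply PySem.List.sorted_rev_eq_of_perm_of_pairwise_gt
  · exact List.Perm.map _ (List.reverse_perm _)
  · exact List.Pairwise.map _ (fun _ _ h => int_ofNat_strictMono h)
      ((List.pairwise_reverse).mpr (ascIdx_pairwise xs))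

theorem sorted_rev_desc (xs : List (List Int)) :
    PySem.List.sorted ((ascIdx xs).reverse.map (fun n : Nat => (n : Int))) (fun x => x) true
      = ((ascIdx xs).reverse.map (fun n : Nat => (n : Int))) := by
  apply PySem.List.sorted_rev_eq_of_perm_of_pairwise_gt
  · exact List.Perm.refl _
  · exact List.Pairwise.map _ (fun _ _ h => int_ofNat_strictMono h)
      ((List.pairwise_reverse).mpr (ascIdx_pairwise xs))

-- ===== VERDICT (by name: the statement is the Claim_ definition above) =====
theorem remove_zeroset_spec : Claim_equal_remove_zeroset := by
  intro xs _
  show remove_zeroset xs = remove_zeroset_alt xs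
  unfold remove_zeroset remove_zeroset_alt
  simp only [tided_eq]
  set D : List Int := (ascIdx xs).reverse.map (fun n : Nat => (n : Int)) with hDdef
  have hlen : (((ascIdx xs).map (fun n : Nat => (n : Int))).length : Int) =
      0 + ((D.length : Nat) : Int) := by simp [hDdef]
  rw [hlen, loop_snd D (sorted_rev_desc xs) D.length 0
        ((ascIdx xs).map (fun n : Nat => (n : Int))) xs (sorted_rev_asc xs)]
  rw [show ((0 : Int) + (D.length : Int)) = (D.length : Int) by ring]
  rw [PySem.List.foldl_pyRange_zero_pyGetD' D 0 (fun acc e => acc.eraseIdx e.toNat) xs]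
  rw [hDdef, List.foldl_map]
  simpa using foldl_eraseIdx_desc xs
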